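-- pv_equiv track=rewrite | github.com/kobeomseok95/codingTest | boj/gold/14500.py | get_nieun_scores
-- ===== SOURCE A (Python) =====
-- def get_nieun_scores(n, m, scores):
--     answer = 0
--     for i in range(n - 2):
--         for j in range(m - 1):
--             answer = max(answer, scores[i][j] + scores[i + 1][j] + scores[i + 2][j] + scores[i + 2][j + 1])
--             answer = max(answer, scores[i][j] + scores[i][j + 1] + scores[i + 1][j + 1] + scores[i + 2][j + 1])
--             answer = max(answer, scores[i + 2][j] + scores[i + 2][j + 1] + scores[i + 1][j + 1] + scores[i][j + 1])
--             answer = max(answer, scores[i][j] + scores[i][j + 1] + scores[i + 1][j] + scores[i + 2][j])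
--
--     for i in range(n - 1):
--         for j in range(m - 2):
--             answer = max(answer, scores[i][j] + scores[i + 1][j] + scores[i + 1][j + 1] + scores[i + 1][j + 2])
--             answer = max(answer, scores[i + 1][j] + scores[i + 1][j + 1] + scores[i + 1][j + 2] + scores[i][j + 2])
--             answer = max(answer, scores[i][j] + scores[i][j + 1] + scores[i][j + 2] + scores[i + 1][j])
--             answer = max(answer, scores[i][j] + scores[i][j + 1] + scores[i][j + 2] + scores[i + 1][j + 2])
--
--     return answer
-- ===== SOURCE B (Python) =====
-- # Different decomposition: every shape A tries is a 3-in-a-line segment plus one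
-- # cell attached perpendicular at an end; B enumerates segments and, per segment,
-- # adds the best attachable end cell (max distributes over +), instead of 8
-- # hard-coded 4-cell sums per anchor.
-- def get_nieun_scores(n, m, scores):
--     answer = 0
--     # vertical 3-cell segments: attach at left/right of the top or bottom cell
--     for i in range(n - 2):
--         for j in range(m):
--             ends = [(i, j - 1), (i + 2, j - 1), (i, j + 1), (i + 2, j + 1)]
--             attach = [scores[r][c] for r, c in ends if 0 <= c < m]
--             if attach:
--                 answer = max(answer,
--                              scores[i][j] + scores[i + 1][j] + scores[i + 2][j] + max(attach))
--     # horizontal 3-cell segments: attach above/below the left or right cell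
--     for i in range(n):
--         for j in range(m - 2):
--             ends = [(i - 1, j), (i - 1, j + 2), (i + 1, j), (i + 1, j + 2)]
--             attach = [scores[r][c] for r, c in ends if 0 <= r < n]
--             if attach:
--                 answer = max(answer,
--                              scores[i][j] + scores[i][j + 1] + scores[i][j + 2] + max(attach))
--     return answer
-- ===== Notes on version B (the rewrite author's own statement) =====
-- stated objective: alternative
-- what changed: B factors each of A's eight 4-cell sums as a 3-in-a-line segment plus one perpendicular end cell: it enumerates vertical and horizontal 3-cell segments and adds the best in-range attachable end cell (max distributes over +), instead of A's eight hard-coded 4-cell sums per anchor over two separately-bounded loop nests.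
import Mathlib
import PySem

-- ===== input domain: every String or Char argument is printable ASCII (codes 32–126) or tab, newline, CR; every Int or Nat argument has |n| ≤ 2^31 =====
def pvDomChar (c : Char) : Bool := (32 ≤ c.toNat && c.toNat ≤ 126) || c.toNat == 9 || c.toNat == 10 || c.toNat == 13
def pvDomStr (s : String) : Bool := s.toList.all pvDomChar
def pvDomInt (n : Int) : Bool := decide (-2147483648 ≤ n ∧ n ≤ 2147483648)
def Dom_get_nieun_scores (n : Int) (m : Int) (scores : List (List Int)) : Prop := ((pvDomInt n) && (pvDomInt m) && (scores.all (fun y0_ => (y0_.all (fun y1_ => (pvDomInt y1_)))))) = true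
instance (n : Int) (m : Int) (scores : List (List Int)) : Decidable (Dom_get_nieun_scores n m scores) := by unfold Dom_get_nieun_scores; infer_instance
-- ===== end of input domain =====

-- B views each placement as a 3-in-a-line segment plus the best attachable perpendicular
-- end cell (max distributes over +); A tries eight hard-coded 4-cell sums per anchor.

-- ===== PORT A =====
-- scores[i][j] (indices are always in range under Pre_; the default is never returned there)
def pvCell (scores : List (List Int)) (i j : Int) : Int :=
  PySem.List.pyGetD (PySem.List.pyGetD scores i []) j 0

def get_nieun_scores (n : Int) (m : Int) (scores : List (List Int)) : Int :=
  let a1 := (PySem.List.pyRange 0 (n - 2) 1).foldl (fun acc i =>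
    (PySem.List.pyRange 0 (m - 1) 1).foldl (fun acc j =>
      max (max (max (max acc
        (pvCell scores i j + pvCell scores (i+1) j + pvCell scores (i+2) j + pvCell scores (i+2) (j+1)))
        (pvCell scores i j + pvCell scores i (j+1) + pvCell scores (i+1) (j+1) + pvCell scores (i+2) (j+1)))
        (pvCell scores (i+2) j + pvCell scores (i+2) (j+1) + pvCell scores (i+1) (j+1) + pvCell scores i (j+1)))
        (pvCell scores i j + pvCell scores i (j+1) + pvCell scores (i+1) j + pvCell scores (i+2) j)) acc) 0
  (PySem.List.pyRange 0 (n - 1) 1).foldl (fun acc i =>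
    (PySem.List.pyRange 0 (m - 2) 1).foldl (fun acc j =>
      max (max (max (max acc
        (pvCell scores i j + pvCell scores (i+1) j + pvCell scores (i+1) (j+1) + pvCell scores (i+1) (j+2)))
        (pvCell scores (i+1) j + pvCell scores (i+1) (j+1) + pvCell scores (i+1) (j+2) + pvCell scores i (j+2)))
        (pvCell scores i j + pvCell scores i (j+1) + pvCell scores i (j+2) + pvCell scores (i+1) j))
        (pvCell scores i j + pvCell scores i (j+1) + pvCell scores i (j+2) + pvCell scores (i+1) (j+2))) acc) a1

-- ===== PORT B =====
-- attach list of a vertical segment (i..i+2, j): in-range cells left/right of its two ends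
def pvAttachV (m : Int) (scores : List (List Int)) (i j : Int) : List Int :=
  (([(i, j-1), (i+2, j-1), (i, j+1), (i+2, j+1)] : List (Int × Int)).filter
    (fun p => decide (0 ≤ p.2) && decide (p.2 < m))).map (fun p => pvCell scores p.1 p.2)

-- attach list of a horizontal segment (i, j..j+2): in-range cells above/below its two ends
def pvAttachH (n : Int) (scores : List (List Int)) (i j : Int) : List Int :=
  (([(i-1, j), (i-1, j+2), (i+1, j), (i+1, j+2)] : List (Int × Int)).filter
    (fun p => decide (0 ≤ p.1) && decide (p.1 < n))).map (fun p => pvCell scores p.1 p.2)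

def pvTripV (scores : List (List Int)) (i j : Int) : Int :=
  pvCell scores i j + pvCell scores (i+1) j + pvCell scores (i+2) j

def pvTripH (scores : List (List Int)) (i j : Int) : Int :=
  pvCell scores i j + pvCell scores i (j+1) + pvCell scores i (j+2)

def get_nieun_scores_alt (n : Int) (m : Int) (scores : List (List Int)) : Int :=
  let a1 := (PySem.List.pyRange 0 (n - 2) 1).foldl (fun acc i =>
    (PySem.List.pyRange 0 m 1).foldl (fun acc j =>
      if (pvAttachV m scores i j).isEmpty then acc
      else max acc (pvTripV scores i j +
        ((PySem.List.max? (pvAttachV m scores i j) (fun x => x)).getD 0))) acc) 0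
  (PySem.List.pyRange 0 n 1).foldl (fun acc i =>
    (PySem.List.pyRange 0 (m - 2) 1).foldl (fun acc j =>
      if (pvAttachH n scores i j).isEmpty then acc
      else max acc (pvTripH scores i j +
        ((PySem.List.max? (pvAttachH n scores i j) (fun x => x)).getD 0))) acc) a1

-- ===== PRECONDITION & SPEC =====
-- Pre_ excludes exactly the inputs where Python A raises IndexError: whenever either of A's
-- loop nests is non-empty, the grid must have at least n rows whose first n rows each have
-- at least m entries (those are exactly the cells A reads).
def Pre_get_nieun_scores (n : Int) (m : Int) (scores : List (List Int)) : Prop :=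
  ((3 ≤ n ∧ 2 ≤ m) ∨ (2 ≤ n ∧ 3 ≤ m)) →
    (n.toNat ≤ scores.length ∧ ∀ row ∈ scores.take n.toNat, m.toNat ≤ row.length)
instance (n : Int) (m : Int) (scores : List (List Int)) : Decidable (Pre_get_nieun_scores n m scores) := by unfold Pre_get_nieun_scores; infer_instance

def pvWitness_get_nieun_scores : Int × Int × List (List Int) := (3, 2, [[1, 2], [3, 4], [5, 6]])

def Spec_get_nieun_scores (n : Int) (m : Int) (scores : List (List Int)) (out : Int) : Prop := out = get_nieun_scores_alt n m scores
instance (n : Int) (m : Int) (scores : List (List Int)) (out : Int) : Decidable (Spec_get_nieun_scores n m scores out) := by unfold Spec_get_nieun_scores; infer_instance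

-- ===== CLAIM (what is proved, stated in full; the proofs are below) =====
def Claim_equal_get_nieun_scores : Prop := ∀ (n : Int) (m : Int) (scores : List (List Int)), Dom_get_nieun_scores n m scores → Pre_get_nieun_scores n m scores → Spec_get_nieun_scores n m scores (get_nieun_scores n m scores)

-- ===== LEMMAS AND PROOFS =====

-- a nested loop whose inner body folds max over a per-element candidate list is the max-fold of the flatMap
theorem pv_foldl_max_flatMap {α : Type} (L : List α) (f : α → List Int) (a : Int) :
    L.foldl (fun acc x => (f x).foldl max acc) a = (L.flatMap f).foldl max a := by
  induction L generalizing a with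
  | nil => rfl
  | cons x t ih => simp only [List.foldl_cons, List.flatMap_cons, List.foldl_append, ih]

theorem pv_foldl_max_le (L : List Int) (a c : Int) (ha : a ≤ c) (h : ∀ x ∈ L, x ≤ c) :
    L.foldl max a ≤ c := by
  induction L generalizing a with
  | nil => exact ha
  | cons x t ih =>
    exact ih _ (max_le ha (h x (by simp))) (fun y hy => h y (by simp [hy]))

-- mutual domination of the candidate lists gives equal running maxima
theorem pv_foldl_max_eq_of_dom (L₁ L₂ : List Int) (a : Int)
    (h₁ : ∀ x ∈ L₁, ∃ y ∈ L₂, x ≤ y) (h₂ : ∀ y ∈ L₂, ∃ x ∈ L₁, y ≤ x) :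
    L₁.foldl max a = L₂.foldl max a := by
  apply le_antisymm
  · refine pv_foldl_max_le _ _ _ (PySem.List.le_foldl_max L₂ a).1 (fun x hx => ?_)
    obtain ⟨y, hy, hxy⟩ := h₁ x hx
    exact le_trans hxy ((PySem.List.le_foldl_max L₂ a).2 y hy)
  · refine pv_foldl_max_le _ _ _ (PySem.List.le_foldl_max L₁ a).1 (fun y hy => ?_)
    obtain ⟨x, hx, hyx⟩ := h₂ y hy
    exact le_trans hyx ((PySem.List.le_foldl_max L₁ a).2 x hx)

-- candidate lists of the two ports
def pvListA (n m : Int) (scores : List (List Int)) : List Int :=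
  ((PySem.List.pyRange 0 (n - 2) 1).flatMap (fun i =>
    (PySem.List.pyRange 0 (m - 1) 1).flatMap (fun j =>
      [pvCell scores i j + pvCell scores (i+1) j + pvCell scores (i+2) j + pvCell scores (i+2) (j+1),
       pvCell scores i j + pvCell scores i (j+1) + pvCell scores (i+1) (j+1) + pvCell scores (i+2) (j+1),
       pvCell scores (i+2) j + pvCell scores (i+2) (j+1) + pvCell scores (i+1) (j+1) + pvCell scores i (j+1),
       pvCell scores i j + pvCell scores i (j+1) + pvCell scores (i+1) j + pvCell scores (i+2) j])))
  ++ ((PySem.List.pyRange 0 (n - 1) 1).flatMap (fun i =>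
    (PySem.List.pyRange 0 (m - 2) 1).flatMap (fun j =>
      [pvCell scores i j + pvCell scores (i+1) j + pvCell scores (i+1) (j+1) + pvCell scores (i+1) (j+2),
       pvCell scores (i+1) j + pvCell scores (i+1) (j+1) + pvCell scores (i+1) (j+2) + pvCell scores i (j+2),
       pvCell scores i j + pvCell scores i (j+1) + pvCell scores i (j+2) + pvCell scores (i+1) j,
       pvCell scores i j + pvCell scores i (j+1) + pvCell scores i (j+2) + pvCell scores (i+1) (j+2)])))

def pvVcand (m : Int) (scores : List (List Int)) (i j : Int) : List Int :=
  if (pvAttachV m scores i j).isEmpty then []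
  else [pvTripV scores i j + ((PySem.List.max? (pvAttachV m scores i j) (fun x => x)).getD 0)]

def pvHcand (n : Int) (scores : List (List Int)) (i j : Int) : List Int :=
  if (pvAttachH n scores i j).isEmpty then []
  else [pvTripH scores i j + ((PySem.List.max? (pvAttachH n scores i j) (fun x => x)).getD 0)]

def pvListB (n m : Int) (scores : List (List Int)) : List Int :=
  ((PySem.List.pyRange 0 (n - 2) 1).flatMap (fun i =>
    (PySem.List.pyRange 0 m 1).flatMap (fun j => pvVcand m scores i j)))
  ++ ((PySem.List.pyRange 0 n 1).flatMap (fun i =>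
    (PySem.List.pyRange 0 (m - 2) 1).flatMap (fun j => pvHcand n scores i j)))

theorem pvA_eq (n m : Int) (scores : List (List Int)) :
    get_nieun_scores n m scores = (pvListA n m scores).foldl max 0 := by
  simp only [pvListA, List.foldl_append, ← pv_foldl_max_flatMap]
  rfl

theorem pv_if_single_foldl (c : Bool) (x acc : Int) :
    ((if c then [] else [x]) : List Int).foldl max acc = if c then acc else max acc x := by
  cases c <;> rfl

theorem pvB_eq (n m : Int) (scores : List (List Int)) :
    get_nieun_scores_alt n m scores = (pvListB n m scores).foldl max 0 := by
  simp only [pvListB, List.foldl_append, ← pv_foldl_max_flatMap, pvVcand, pvHcand,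
    pv_if_single_foldl]
  rfl

-- membership in the attach lists, spelled out
theorem pv_mem_attachV (m : Int) (scores : List (List Int)) (i j v : Int) :
    v ∈ pvAttachV m scores i j ↔
      ((0 ≤ j-1 ∧ j-1 < m) ∧ v = pvCell scores i (j-1)) ∨
      ((0 ≤ j-1 ∧ j-1 < m) ∧ v = pvCell scores (i+2) (j-1)) ∨
      ((0 ≤ j+1 ∧ j+1 < m) ∧ v = pvCell scores i (j+1)) ∨
      ((0 ≤ j+1 ∧ j+1 < m) ∧ v = pvCell scores (i+2) (j+1)) := by
  unfold pvAttachV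
  simp only [List.filter_cons, List.filter_nil, Bool.and_eq_true, decide_eq_true_eq]
  split_ifs with hL hR hR <;> simp_all
  all_goals first
    | tauto
    | (have hF : ¬(0 ≤ j + 1 ∧ j + 1 < m) := fun hb => absurd (hR hb.1) (by omega)
       simp [hF]
       try tauto)
    | (have hF : ¬(1 ≤ j ∧ j ≤ m) := fun hb => absurd hb.2 (by have := hL hb.1; omega)
       simp [hF]
       try tauto)

theorem pv_mem_attachH (n : Int) (scores : List (List Int)) (i j v : Int) :
    v ∈ pvAttachH n scores i j ↔
      ((0 ≤ i-1 ∧ i-1 < n) ∧ v = pvCell scores (i-1) j) ∨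
      ((0 ≤ i-1 ∧ i-1 < n) ∧ v = pvCell scores (i-1) (j+2)) ∨
      ((0 ≤ i+1 ∧ i+1 < n) ∧ v = pvCell scores (i+1) j) ∨
      ((0 ≤ i+1 ∧ i+1 < n) ∧ v = pvCell scores (i+1) (j+2)) := by
  unfold pvAttachH
  simp only [List.filter_cons, List.filter_nil, Bool.and_eq_true, decide_eq_true_eq]
  split_ifs with hL hR hR <;> simp_all
  all_goals first
    | tauto
    | (have hF : ¬(0 ≤ i + 1 ∧ i + 1 < n) := fun hb => absurd (hR hb.1) (by omega)
       simp [hF]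
       try tauto)
    | (have hF : ¬(1 ≤ i ∧ i ≤ n) := fun hb => absurd hb.2 (by have := hL hb.1; omega)
       simp [hF]
       try tauto)

-- the max of a nonempty attach list: a member, and an upper bound
theorem pv_max_spec (L : List Int) (h : L ≠ []) :
    ((PySem.List.max? L (fun x => x)).getD 0) ∈ L ∧
      ∀ x ∈ L, x ≤ ((PySem.List.max? L (fun x => x)).getD 0) := by
  rcases hm : PySem.List.max? L (fun x => x) with _ | v
  · exact absurd ((PySem.List.max?_eq_none_iff _ _).1 hm) h
  · exact ⟨by simpa using PySem.List.max?_mem hm,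
      fun x hx => by simpa using PySem.List.max?_isMax hm x hx⟩

-- every A candidate is dominated by a B candidate
theorem pv_dom_AB (n m : Int) (scores : List (List Int)) :
    ∀ x ∈ pvListA n m scores, ∃ y ∈ pvListB n m scores, x ≤ y := by
  intro x hx
  simp only [pvListA, List.mem_append, List.mem_flatMap, PySem.List.mem_pyRange_one,
    List.mem_cons, List.not_mem_nil, or_false, and_assoc] at hx
  have mk : ∀ (i j : Int), 0 ≤ i → i < n - 2 → 0 ≤ j → j < m →
      (pvAttachV m scores i j) ≠ [] →
      ∀ v ∈ pvAttachV m scores i j, x ≤ pvTripV scores i j + v →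
      ∃ y ∈ pvListB n m scores, x ≤ y := by
    intro i j hi0 hin hj0 hjm hne v hv hle
    obtain ⟨hmem, hub⟩ := pv_max_spec _ hne
    refine ⟨pvTripV scores i j + ((PySem.List.max? (pvAttachV m scores i j) (fun x => x)).getD 0),
      ?_, le_trans hle (by have := hub v hv; omega)⟩
    simp only [pvListB, List.mem_append, List.mem_flatMap, PySem.List.mem_pyRange_one, and_assoc]
    exact Or.inl ⟨i, hi0, hin, j, hj0, hjm, by
      simp [pvVcand, List.isEmpty_iff, hne]⟩
  have mkH : ∀ (i j : Int), 0 ≤ i → i < n → 0 ≤ j → j < m - 2 →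
      (pvAttachH n scores i j) ≠ [] →
      ∀ v ∈ pvAttachH n scores i j, x ≤ pvTripH scores i j + v →
      ∃ y ∈ pvListB n m scores, x ≤ y := by
    intro i j hi0 hin hj0 hjm hne v hv hle
    obtain ⟨hmem, hub⟩ := pv_max_spec _ hne
    refine ⟨pvTripH scores i j + ((PySem.List.max? (pvAttachH n scores i j) (fun x => x)).getD 0),
      ?_, le_trans hle (by have := hub v hv; omega)⟩
    simp only [pvListB, List.mem_append, List.mem_flatMap, PySem.List.mem_pyRange_one, and_assoc]
    exact Or.inr ⟨i, hi0, hin, j, hj0, hjm, by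
      simp [pvHcand, List.isEmpty_iff, hne]⟩
  rcases hx with ⟨i, hi0, hin, j, hj0, hjm, hc⟩ | ⟨i, hi0, hin, j, hj0, hjm, hc⟩
  · -- vertical-based shapes
    have hne1 : pvAttachV m scores i j ≠ [] := by
      intro h; have := (pv_mem_attachV m scores i j (pvCell scores i (j+1))).2
        (Or.inr (Or.inr (Or.inl ⟨⟨by omega, by omega⟩, rfl⟩)))
      simp [h] at this
    have hne2 : pvAttachV m scores i (j+1) ≠ [] := by
      intro h; have := (pv_mem_attachV m scores i (j+1) (pvCell scores i j)).2
        (Or.inl ⟨⟨by omega, by omega⟩, by norm_num⟩)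
      simp [h] at this
    rcases hc with rfl | rfl | rfl | rfl
    · exact mk i j hi0 hin hj0 (by omega) hne1 (pvCell scores (i+2) (j+1))
        ((pv_mem_attachV m scores i j _).2 (Or.inr (Or.inr (Or.inr ⟨⟨by omega, by omega⟩, rfl⟩))))
        (by unfold pvTripV; omega)
    · exact mk i (j+1) hi0 hin (by omega) (by omega) hne2 (pvCell scores i j)
        ((pv_mem_attachV m scores i (j+1) _).2 (Or.inl ⟨⟨by omega, by omega⟩, by norm_num⟩))
        (by unfold pvTripV; omega)
    · exact mk i (j+1) hi0 hin (by omega) (by omega) hne2 (pvCell scores (i+2) j)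
        ((pv_mem_attachV m scores i (j+1) _).2 (Or.inr (Or.inl ⟨⟨by omega, by omega⟩, by norm_num⟩)))
        (by unfold pvTripV; omega)
    · exact mk i j hi0 hin hj0 (by omega) hne1 (pvCell scores i (j+1))
        ((pv_mem_attachV m scores i j _).2 (Or.inr (Or.inr (Or.inl ⟨⟨by omega, by omega⟩, rfl⟩))))
        (by unfold pvTripV; omega)
  · -- horizontal-based shapes
    have hne1 : pvAttachH n scores i j ≠ [] := by
      intro h; have := (pv_mem_attachH n scores i j (pvCell scores (i+1) j)).2
        (Or.inr (Or.inr (Or.inl ⟨⟨by omega, by omega⟩, rfl⟩)))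
      simp [h] at this
    have hne2 : pvAttachH n scores (i+1) j ≠ [] := by
      intro h; have := (pv_mem_attachH n scores (i+1) j (pvCell scores i j)).2
        (Or.inl ⟨⟨by omega, by omega⟩, by norm_num⟩)
      simp [h] at this
    rcases hc with rfl | rfl | rfl | rfl
    · exact mkH (i+1) j (by omega) (by omega) hj0 hjm hne2 (pvCell scores i j)
        ((pv_mem_attachH n scores (i+1) j _).2 (Or.inl ⟨⟨by omega, by omega⟩, by norm_num⟩))
        (by unfold pvTripH; omega)
    · exact mkH (i+1) j (by omega) (by omega) hj0 hjm hne2 (pvCell scores i (j+2))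
        ((pv_mem_attachH n scores (i+1) j _).2 (Or.inr (Or.inl ⟨⟨by omega, by omega⟩, by norm_num⟩)))
        (by unfold pvTripH; omega)
    · exact mkH i j hi0 (by omega) hj0 hjm hne1 (pvCell scores (i+1) j)
        ((pv_mem_attachH n scores i j _).2 (Or.inr (Or.inr (Or.inl ⟨⟨by omega, by omega⟩, rfl⟩))))
        (by unfold pvTripH; omega)
    · exact mkH i j hi0 (by omega) hj0 hjm hne1 (pvCell scores (i+1) (j+2))
        ((pv_mem_attachH n scores i j _).2 (Or.inr (Or.inr (Or.inr ⟨⟨by omega, by omega⟩, rfl⟩))))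
        (by unfold pvTripH; omega)

-- every B candidate is realised exactly by an A candidate
theorem pv_dom_BA (n m : Int) (scores : List (List Int)) :
    ∀ y ∈ pvListB n m scores, ∃ x ∈ pvListA n m scores, y ≤ x := by
  intro y hy
  simp only [pvListB, List.mem_append, List.mem_flatMap, PySem.List.mem_pyRange_one, and_assoc] at hy
  rcases hy with ⟨i, hi0, hin, j, hj0, hjm, hc⟩ | ⟨i, hi0, hin, j, hj0, hjm, hc⟩
  · -- vertical segment
    have hne : ¬ (pvAttachV m scores i j).isEmpty := by
      rcases h : (pvAttachV m scores i j).isEmpty with _ | _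
      · simp
      · simp [pvVcand, h] at hc
    rw [List.isEmpty_iff] at hne
    obtain ⟨hmem, _⟩ := pv_max_spec _ hne
    have hval : y = pvTripV scores i j +
        ((PySem.List.max? (pvAttachV m scores i j) (fun x => x)).getD 0) := by
      simp [pvVcand, List.isEmpty_iff, hne] at hc; omega
    rw [pv_mem_attachV] at hmem
    refine ⟨y, ?_, le_refl y⟩
    simp only [pvListA, List.mem_append, List.mem_flatMap, PySem.List.mem_pyRange_one,
      List.mem_cons, List.not_mem_nil, or_false, and_assoc]
    rcases hmem with ⟨⟨hb1, hb2⟩, hv⟩ | ⟨⟨hb1, hb2⟩, hv⟩ | ⟨⟨hb1, hb2⟩, hv⟩ | ⟨⟨hb1, hb2⟩, hv⟩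
    · -- left at top ⇒ A shape 2 at (i, j-1)
      refine Or.inl ⟨i, hi0, hin, j-1, by omega, by omega, Or.inr (Or.inl ?_)⟩
      rw [hval, hv]; unfold pvTripV; norm_num; try ring
    · -- left at bottom ⇒ A shape 3 at (i, j-1)
      refine Or.inl ⟨i, hi0, hin, j-1, by omega, by omega, Or.inr (Or.inr (Or.inl ?_))⟩
      rw [hval, hv]; unfold pvTripV; norm_num; try ring
    · -- right at top ⇒ A shape 4 at (i, j)
      refine Or.inl ⟨i, hi0, hin, j, hj0, by omega, Or.inr (Or.inr (Or.inr ?_))⟩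
      rw [hval, hv]; unfold pvTripV; ring
    · -- right at bottom ⇒ A shape 1 at (i, j)
      refine Or.inl ⟨i, hi0, hin, j, hj0, by omega, Or.inl ?_⟩
      rw [hval, hv]; unfold pvTripV; ring
  · -- horizontal segment
    have hne : ¬ (pvAttachH n scores i j).isEmpty := by
      rcases h : (pvAttachH n scores i j).isEmpty with _ | _
      · simp
      · simp [pvHcand, h] at hc
    rw [List.isEmpty_iff] at hne
    obtain ⟨hmem, _⟩ := pv_max_spec _ hne
    have hval : y = pvTripH scores i j +
        ((PySem.List.max? (pvAttachH n scores i j) (fun x => x)).getD 0) := by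
      simp [pvHcand, List.isEmpty_iff, hne] at hc; omega
    rw [pv_mem_attachH] at hmem
    refine ⟨y, ?_, le_refl y⟩
    simp only [pvListA, List.mem_append, List.mem_flatMap, PySem.List.mem_pyRange_one,
      List.mem_cons, List.not_mem_nil, or_false, and_assoc]
    rcases hmem with ⟨⟨hb1, hb2⟩, hv⟩ | ⟨⟨hb1, hb2⟩, hv⟩ | ⟨⟨hb1, hb2⟩, hv⟩ | ⟨⟨hb1, hb2⟩, hv⟩
    · -- above left end ⇒ A shape 5 at (i-1, j)
      refine Or.inr ⟨i-1, by omega, by omega, j, hj0, hjm, Or.inl ?_⟩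
      rw [hval, hv]; unfold pvTripH; norm_num; try ring
    · -- above right end ⇒ A shape 6 at (i-1, j)
      refine Or.inr ⟨i-1, by omega, by omega, j, hj0, hjm, Or.inr (Or.inl ?_)⟩
      rw [hval, hv]; unfold pvTripH; norm_num; try ring
    · -- below left end ⇒ A shape 7 at (i, j)
      refine Or.inr ⟨i, hi0, by omega, j, hj0, hjm, Or.inr (Or.inr (Or.inl ?_))⟩
      rw [hval, hv]; unfold pvTripH; ring
    · -- below right end ⇒ A shape 8 at (i, j)
      refine Or.inr ⟨i, hi0, by omega, j, hj0, hjm, Or.inr (Or.inr (Or.inr ?_))⟩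
      rw [hval, hv]; unfold pvTripH; ring

-- ===== VERDICT (by name: the statement is the Claim_ definition above) =====
theorem get_nieun_scores_spec : Claim_equal_get_nieun_scores := by
  intro n m scores _ _
  unfold Spec_get_nieun_scores
  rw [pvA_eq, pvB_eq]
  exact pv_foldl_max_eq_of_dom _ _ 0 (pv_dom_AB n m scores) (pv_dom_BA n m scores)
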